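-- pv_equiv track=rewrite | github.com/LaimeJesus/PCA | PCA.py | Intent
-- ===== SOURCE A (Python) =====
-- def Intent(S,context):
--     R = set([])
--     for a in range(context[2]):
--         add = True
--         for o in S:
--             if [o,a] not in context[0]:
--                 add = False
--         if add:
--             R.add(a)
--     return R
-- ===== SOURCE B (Python) =====
-- def Intent(S, context):
--     # Build the attribute set of each object once, then intersect.
--     attrs = {}
--     for pair in context[0]:
--         if len(pair) == 2:
--             o, a = pair
--             attrs.setdefault(o, set()).add(a)
--     R = set(range(context[2]))
--     for o in S:
--         R = R & attrs.get(o, set())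
--     return R
-- ===== Notes on version B (the rewrite author's own statement) =====
-- stated objective: faster
-- what changed: Instead of testing every (object, attribute) pair by a linear membership scan of the incidence list, B builds a dict object -> attribute set in one pass over context[0] and folds set intersection over S starting from set(range(context[2])).
import Mathlib
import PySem

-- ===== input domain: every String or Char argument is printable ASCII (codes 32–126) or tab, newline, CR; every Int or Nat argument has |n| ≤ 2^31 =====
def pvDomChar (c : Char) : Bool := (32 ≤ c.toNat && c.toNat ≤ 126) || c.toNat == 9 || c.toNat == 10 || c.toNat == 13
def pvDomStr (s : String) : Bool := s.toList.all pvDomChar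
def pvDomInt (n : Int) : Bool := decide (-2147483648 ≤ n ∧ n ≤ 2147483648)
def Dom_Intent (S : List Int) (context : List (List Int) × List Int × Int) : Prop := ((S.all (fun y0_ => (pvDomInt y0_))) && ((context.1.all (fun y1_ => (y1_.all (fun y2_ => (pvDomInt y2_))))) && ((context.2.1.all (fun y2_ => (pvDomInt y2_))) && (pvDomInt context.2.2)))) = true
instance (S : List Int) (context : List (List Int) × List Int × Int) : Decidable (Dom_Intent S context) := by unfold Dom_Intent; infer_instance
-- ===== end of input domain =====

-- B replaces A's per-attribute linear membership scans of context[0] by a single pass building a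
-- dict object -> attribute set, then intersects those sets over S starting from set(range(context[2])).


-- ===== PORT A =====
def Intent (S : List Int) (context : List (List Int) × List Int × Int) : List Int :=
  (PySem.List.pyRange 0 context.2.2 1).foldl (fun R a =>
    let add := S.foldl (fun add o => if [o, a] ∉ context.1 then false else add) true
    if add then PySem.Set.add R a else R)
    (PySem.Set.ofList ([] : List Int))

-- ===== PORT B =====
def Intent_alt (S : List Int) (context : List (List Int) × List Int × Int) : List Int :=
  -- the 'match [o, a]' arm is the 'len(pair) == 2' guard plus the destructuring 'o, a = pair'
  let attrs : PySem.Dict Int (PySem.Set Int) :=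
    context.1.foldl (fun d pair =>
      match pair with
      | [o, a] => d.modify o PySem.Set.empty (fun s => PySem.Set.add s a)
      | _ => d) PySem.Dict.empty
  let R : PySem.Set Int := PySem.Set.ofList (PySem.List.pyRange 0 context.2.2 1)
  S.foldl (fun R o => PySem.Set.inter R (attrs.getD o PySem.Set.empty)) R

-- ===== PRECONDITION & SPEC =====
def Spec_Intent (S : List Int) (context : List (List Int) × List Int × Int) (out : List Int) : Prop := out = Intent_alt S context
instance (S : List Int) (context : List (List Int) × List Int × Int) (out : List Int) : Decidable (Spec_Intent S context out) := by unfold Spec_Intent; infer_instance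

-- ===== CLAIM (what is proved, stated in full; the proofs are below) =====
def Claim_equal_Intent : Prop := ∀ (S : List Int) (context : List (List Int) × List Int × Int), Dom_Intent S context → Spec_Intent S context (Intent S context)

-- ===== LEMMAS AND PROOFS =====

-- A's inner loop computes "all objects of S own attribute a"
lemma intentA_inner (C : List (List Int)) (a : Int) (S : List Int) (acc : Bool) :
    S.foldl (fun add o => if [o, a] ∉ C then false else add) acc
      = (acc && decide (∀ o ∈ S, [o, a] ∈ C)) := by
  induction S generalizing acc with
  | nil => simp
  | cons o S ih =>
    simp only [List.foldl_cons, ih, List.mem_cons, forall_eq_or_imp]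
    by_cases h : [o, a] ∈ C <;> simp [h]

-- A's outer loop over a duplicate-free list of fresh elements is a filter
lemma intentA_outer (p : Int → Bool) (L R0 : List Int) (hL : L.Nodup)
    (hfresh : ∀ x ∈ L, x ∉ R0) :
    L.foldl (fun R x => if p x then PySem.Set.add R x else R) R0 = R0 ++ L.filter p := by
  induction L generalizing R0 with
  | nil => simp
  | cons x L ih =>
    simp only [List.foldl_cons, List.filter_cons]
    have hx : x ∉ R0 := hfresh x (by simp)
    by_cases hp : p x
    · rw [hp, if_pos rfl, PySem.Set.add_of_not_mem hx,
        ih (R0 ++ [x]) (List.Nodup.of_cons hL)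
          (by intro y hy hmem
              rcases List.mem_append.mp hmem with h | h
              · exact hfresh y (by simp [hy]) h
              · simp only [List.mem_singleton] at h
                exact (List.nodup_cons.mp hL).1 (h ▸ hy))]
      simp
    · rw [if_neg (by simpa using hp), if_neg (by simpa using hp),
        ih R0 (List.Nodup.of_cons hL) (fun y hy => hfresh y (by simp [hy]))]

-- B's dict fold: a is recorded for o exactly when [o, a] occurs in the incidence list
lemma intentB_dict (L : List (List Int)) (d : PySem.Dict Int (PySem.Set Int)) (o a : Int) :
    (a ∈ (L.foldl (fun d pair =>
        match pair with
        | [o, a] => d.modify o PySem.Set.empty (fun s => PySem.Set.add s a)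
        | _ => d) d).getD o PySem.Set.empty)
      ↔ ([o, a] ∈ L ∨ a ∈ d.getD o PySem.Set.empty) := by
  induction L generalizing d with
  | nil => simp
  | cons pair L ih =>
    rcases pair with _ | ⟨x, _ | ⟨y, _ | ⟨z, rest⟩⟩⟩
    · simp only [List.foldl_cons, ih, List.mem_cons]; simp
    · simp only [List.foldl_cons, ih, List.mem_cons]; simp
    · simp only [List.foldl_cons, ih, List.mem_cons, PySem.Dict.getD_modify]
      by_cases ho : o = x
      · subst ho
        simp [PySem.Set.mem_add, or_comm, or_left_comm]
        exact or_assoc.symm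
      · simp [ho]
    · simp only [List.foldl_cons, ih, List.mem_cons]; simp

-- B's intersection fold is a filter by "a belongs to every picked set"
lemma intentB_inter (g : Int → PySem.Set Int) (S R0 : List Int) :
    S.foldl (fun R o => PySem.Set.inter R (g o)) R0
      = R0.filter (fun a => decide (∀ o ∈ S, a ∈ g o)) := by
  induction S generalizing R0 with
  | nil => simp
  | cons o S ih =>
    simp only [List.foldl_cons, ih]
    simp only [PySem.Set.inter, List.filter_filter]
    apply List.filter_congr
    intro a _
    simp [Bool.and_comm]

-- ===== VERDICT (by name: the statement is the Claim_ definition above) =====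
theorem Intent_spec : Claim_equal_Intent := by
  intro S context _
  unfold Spec_Intent Intent Intent_alt
  rw [PySem.Set.ofList_eq_self_of_nodup _ (PySem.List.nodup_pyRange_one 0 context.2.2),
    intentB_inter]
  simp only [intentA_inner, Bool.true_and]
  rw [intentA_outer (fun a => decide (∀ o ∈ S, [o, a] ∈ context.1)) _ _
      (PySem.List.nodup_pyRange_one 0 context.2.2) (by simp),
    PySem.Set.ofList_nil, List.nil_append]
  apply List.filter_congr
  intro a _
  simp only [decide_eq_decide]
  constructor
  · intro h o ho
    exact (intentB_dict context.1 PySem.Dict.empty o a).mpr (Or.inl (h o ho))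
  · intro h o ho
    rcases (intentB_dict context.1 PySem.Dict.empty o a).mp (h o ho) with h1 | h2
    · exact h1
    · simp [PySem.Dict.getD_empty, PySem.Set.empty] at h2
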